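-- pv_equiv track=rewrite | github.com/Absolut-AK/YukiChanBot | rarities.py | getRarity
-- ===== SOURCE A (Python) =====
-- def getRarity(item):
--     common = ['blueMushroom', 'redMushroom', 'blackMushroom',
--      'whiteMushroom', 'yellowMushroom', 'greenMushroom', 'coal', 'smallFish', 'freshWater', 'rock', 'insect']
--     uncommon = ['sulfur', 'iron', 'mediumFish']
--     rare = ['gold', 'bigFish']
--     epic = ['hugeFish']
--     for i in common:
--         if item == i:
--             return 'common'
--     for i in uncommon:
--         if item == i:
--             return 'uncommon'
--     for i in rare:
--         if item == i:
--             return 'rare'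
--     for i in epic:
--         if item == i:
--             return 'epic'
-- ===== SOURCE B (Python) =====
-- def getRarity(item):
--     # One table of (name, rarity) pairs, kept sorted by name; binary search
--     # (lower-bound) replaces A's four sequential membership scans.
--     table = [
--         ('bigFish', 'rare'), ('blackMushroom', 'common'), ('blueMushroom', 'common'),
--         ('coal', 'common'), ('freshWater', 'common'), ('gold', 'rare'),
--         ('greenMushroom', 'common'), ('hugeFish', 'epic'), ('insect', 'common'),
--         ('iron', 'uncommon'), ('mediumFish', 'uncommon'), ('redMushroom', 'common'),
--         ('rock', 'common'), ('smallFish', 'common'), ('sulfur', 'uncommon'),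
--         ('whiteMushroom', 'common'), ('yellowMushroom', 'common'),
--     ]
--     lo, hi = 0, len(table)
--     while lo < hi:
--         mid = (lo + hi) // 2
--         if table[mid][0] < item:
--             lo = mid + 1
--         else:
--             hi = mid
--     if lo < len(table) and table[lo][0] == item:
--         return table[lo][1]
--     return None
-- ===== Notes on version B (the rewrite author's own statement) =====
-- stated objective: alternative
-- what changed: Replaces A's four sequential list scans with a single name-sorted (name, rarity) table queried by a hand-written lower-bound binary search, returning None when the found slot does not hold the item.
import Mathlib
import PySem

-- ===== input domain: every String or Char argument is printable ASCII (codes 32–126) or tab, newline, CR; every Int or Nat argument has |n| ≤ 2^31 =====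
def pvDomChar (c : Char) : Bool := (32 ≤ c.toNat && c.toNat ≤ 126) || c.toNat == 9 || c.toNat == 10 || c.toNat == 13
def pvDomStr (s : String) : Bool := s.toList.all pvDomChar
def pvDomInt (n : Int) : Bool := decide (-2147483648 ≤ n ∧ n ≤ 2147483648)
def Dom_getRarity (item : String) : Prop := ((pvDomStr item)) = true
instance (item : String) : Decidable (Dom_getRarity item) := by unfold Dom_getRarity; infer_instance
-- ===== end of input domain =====

-- B replaces A's four sequential membership scans by one name-sorted (name, rarity) table
-- queried with a hand-written lower-bound binary search (alternative algorithm, same cost class at this size).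


-- ===== PORT A =====
-- the 'for i in l: if item == i: return r' loop (falls through to the next loop as none)
def pvScan (item : String) (l : List String) (r : String) : Option String :=
  match l with
  | [] => none
  | i :: rest => if item == i then some r else pvScan item rest r

def getRarity (item : String) : Option String :=
  let common := ["blueMushroom", "redMushroom", "blackMushroom",
    "whiteMushroom", "yellowMushroom", "greenMushroom", "coal", "smallFish", "freshWater", "rock", "insect"]
  let uncommon := ["sulfur", "iron", "mediumFish"]
  let rare := ["gold", "bigFish"]
  let epic := ["hugeFish"]
  match pvScan item common "common" with
  | some v => some v
  | none =>
    match pvScan item uncommon "uncommon" with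
    | some v => some v
    | none =>
      match pvScan item rare "rare" with
      | some v => some v
      | none => pvScan item epic "epic"

-- ===== PORT B =====
-- Source B's table, sorted by name (17 entries)
def pvTable : List (String × String) :=
  [("bigFish", "rare"), ("blackMushroom", "common"), ("blueMushroom", "common"),
   ("coal", "common"), ("freshWater", "common"), ("gold", "rare"),
   ("greenMushroom", "common"), ("hugeFish", "epic"), ("insect", "common"),
   ("iron", "uncommon"), ("mediumFish", "uncommon"), ("redMushroom", "common"),
   ("rock", "common"), ("smallFish", "common"), ("sulfur", "uncommon"),
   ("whiteMushroom", "common"), ("yellowMushroom", "common")]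

-- Python's '<' on strings, ported by hand: lexicographic comparison of code points
-- (exact for all strings; Python compares by code point, as does this).
def pvStrLt (a b : List Char) : Bool :=
  match a, b with
  | [], [] => false
  | [], _ :: _ => true
  | _ :: _, [] => false
  | x :: xs, y :: ys =>
    if x.toNat < y.toNat then true
    else if y.toNat < x.toNat then false
    else pvStrLt xs ys

-- Source B's 'while lo < hi' lower-bound loop; fuel-based recursion (hi - lo strictly
-- decreases each pass and starts at 17, so fuel 17 is enough for the loop to finish).
-- table[mid] is always in range in the loop, so getD with a dummy default is exact.
def pvBsLoop (item : String) (lo hi : Nat) : Nat → Nat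
  | 0 => lo
  | fuel + 1 =>
    if lo < hi then
      let mid := (lo + hi) / 2  -- (lo+hi)//2 on nonnegative ints: Nat division is exact here
      if pvStrLt (pvTable.getD mid ("", "")).1.toList item.toList then
        pvBsLoop item (mid + 1) hi fuel
      else
        pvBsLoop item lo mid fuel
    else lo

def getRarity_alt (item : String) : Option String :=
  let lo := pvBsLoop item 0 17 17
  if lo < 17 then
    let p := pvTable.getD lo ("", "")
    if p.1 == item then some p.2 else none
  else none

-- ===== PRECONDITION & SPEC =====
def Spec_getRarity (item : String) (out : Option String) : Prop := out = getRarity_alt item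
instance (item : String) (out : Option String) : Decidable (Spec_getRarity item out) := by unfold Spec_getRarity; infer_instance

-- ===== CLAIM (what is proved, stated in full; the proofs are below) =====
def Claim_equal_getRarity : Prop := ∀ (item : String), Dom_getRarity item → Spec_getRarity item (getRarity item)

-- ===== LEMMAS AND PROOFS =====
-- every name stored in the table
theorem pvTable_fst_mem : ∀ i, i < 17 → (pvTable.getD i ("", "")).1 ∈
    (["bigFish", "blackMushroom", "blueMushroom", "coal", "freshWater", "gold",
      "greenMushroom", "hugeFish", "insect", "iron", "mediumFish", "redMushroom",
      "rock", "smallFish", "sulfur", "whiteMushroom", "yellowMushroom"] : List String) := by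
  decide

-- ===== VERDICT (by name: the statement is the Claim_ definition above) =====
set_option maxHeartbeats 1000000 in
theorem getRarity_spec : Claim_equal_getRarity := by
  intro item _
  by_cases h0 : item = "blueMushroom"
  · subst h0; decide
  by_cases h1 : item = "redMushroom"
  · subst h1; decide
  by_cases h2 : item = "blackMushroom"
  · subst h2; decide
  by_cases h3 : item = "whiteMushroom"
  · subst h3; decide
  by_cases h4 : item = "yellowMushroom"
  · subst h4; decide
  by_cases h5 : item = "greenMushroom"
  · subst h5; decide
  by_cases h6 : item = "coal"
  · subst h6; decide
  by_cases h7 : item = "smallFish"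
  · subst h7; decide
  by_cases h8 : item = "freshWater"
  · subst h8; decide
  by_cases h9 : item = "rock"
  · subst h9; decide
  by_cases h10 : item = "insect"
  · subst h10; decide
  by_cases h11 : item = "sulfur"
  · subst h11; decide
  by_cases h12 : item = "iron"
  · subst h12; decide
  by_cases h13 : item = "mediumFish"
  · subst h13; decide
  by_cases h14 : item = "gold"
  · subst h14; decide
  by_cases h15 : item = "bigFish"
  · subst h15; decide
  by_cases h16 : item = "hugeFish"
  · subst h16; decide
  -- item is none of the 17 names: A falls through to none, and B's final
  -- equality check fails whatever index the search lands on.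
  have hA : getRarity item = none := by
    simp [getRarity, pvScan, h0, h1, h2, h3, h4, h5, h6, h7, h8, h9, h10, h11, h12, h13, h14, h15, h16]
  have hB : getRarity_alt item = none := by
    have hdef : getRarity_alt item =
        if pvBsLoop item 0 17 17 < 17 then
          (if (pvTable.getD (pvBsLoop item 0 17 17) ("", "")).1 == item then
            some (pvTable.getD (pvBsLoop item 0 17 17) ("", "")).2
          else none)
        else none := rfl
    rw [hdef]
    by_cases hlt : pvBsLoop item 0 17 17 < 17
    · rw [if_pos hlt]
      have hm := pvTable_fst_mem _ hlt
      have hne : ¬ ((pvTable.getD (pvBsLoop item 0 17 17) ("", "")).1 = item) := by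
        intro e
        rw [e] at hm
        simp only [List.mem_cons, List.not_mem_nil, or_false] at hm
        rcases hm with h | h | h | h | h | h | h | h | h | h | h | h | h | h | h | h | h <;>
          first
            | exact h0 h | exact h1 h | exact h2 h | exact h3 h | exact h4 h | exact h5 h
            | exact h6 h | exact h7 h | exact h8 h | exact h9 h | exact h10 h | exact h11 h
            | exact h12 h | exact h13 h | exact h14 h | exact h15 h | exact h16 h
      have hbne : ¬ (((pvTable.getD (pvBsLoop item 0 17 17) ("", "")).1 == item) = true) := by
        simpa [beq_iff_eq] using hne
      rw [if_neg hbne]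
    · rw [if_neg hlt]
  simp [Spec_getRarity, hA, hB]
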